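-- pv_equiv track=rewrite | github.com/aglinxinyuan/texera | core/python_compiling_service/src/compiler/graph.py | _find_paths_to_leaves
-- ===== SOURCE A (Python) =====
-- from typing import Dict, Iterable, List, Sequence, Set, Tuple
--
-- Vertex = Tuple[str, int]
--
-- def _find_paths_to_leaves(start: Vertex, leaf_nodes: Sequence[Vertex], edges: Dict[Vertex, Set[Vertex]]) -> List[List[Vertex]]:
--     paths: List[List[Vertex]] = []
--
--     def dfs(current: Vertex, path: List[Vertex], visited: Set[Vertex]) -> None:
--         path.append(current)
--         visited.add(current)
--
--         if current in leaf_nodes: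
--             paths.append(path[:])
--         else:
--             for neighbor in edges.get(current, set()):
--                 if neighbor not in visited:
--                     dfs(neighbor, path, visited)
--
--         path.pop()
--         visited.remove(current)
--
--     dfs(start, [], set())
--     return paths
-- ===== SOURCE B (Python) =====
-- from typing import Dict, List, Sequence, Set, Tuple
--
-- Vertex = Tuple[str, int]
--
-- def _find_paths_to_leaves(start: Vertex, leaf_nodes: Sequence[Vertex], edges: Dict[Vertex, Set[Vertex]]) -> List[List[Vertex]]:
--     # Pure compositional DFS: instead of threading a mutable path/visited/results
--     # trio with append/pop backtracking, each call returns the list of path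
--     # suffixes from its node, and the complement set `remaining` (vertices still
--     # allowed on the path) shrinks on every recursive call.
--     vertices = {start}
--     for src, dsts in edges.items():
--         vertices.add(src)
--         vertices.update(dsts)
--
--     def walk(current: Vertex, remaining: Set[Vertex]) -> List[List[Vertex]]:
--         if current in leaf_nodes:
--             return [[current]]
--         return [[current] + rest
--                 for n in edges.get(current, ())
--                 if n in remaining
--                 for rest in walk(n, remaining - {n})]
--
--     return walk(start, vertices - {start})
-- ===== Notes on version B (the rewrite author's own statement) =====
-- stated objective: alternative
-- what changed: The mutating backtracking DFS (shared path/visited with append/pop and a nonlocal results list) is replaced by a pure compositional recursion: each call returns the list of path suffixes from its node, concatenated via a comprehension, and a shrinking 'remaining' set (complement of the path) replaces the growing visited set.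
import Mathlib
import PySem

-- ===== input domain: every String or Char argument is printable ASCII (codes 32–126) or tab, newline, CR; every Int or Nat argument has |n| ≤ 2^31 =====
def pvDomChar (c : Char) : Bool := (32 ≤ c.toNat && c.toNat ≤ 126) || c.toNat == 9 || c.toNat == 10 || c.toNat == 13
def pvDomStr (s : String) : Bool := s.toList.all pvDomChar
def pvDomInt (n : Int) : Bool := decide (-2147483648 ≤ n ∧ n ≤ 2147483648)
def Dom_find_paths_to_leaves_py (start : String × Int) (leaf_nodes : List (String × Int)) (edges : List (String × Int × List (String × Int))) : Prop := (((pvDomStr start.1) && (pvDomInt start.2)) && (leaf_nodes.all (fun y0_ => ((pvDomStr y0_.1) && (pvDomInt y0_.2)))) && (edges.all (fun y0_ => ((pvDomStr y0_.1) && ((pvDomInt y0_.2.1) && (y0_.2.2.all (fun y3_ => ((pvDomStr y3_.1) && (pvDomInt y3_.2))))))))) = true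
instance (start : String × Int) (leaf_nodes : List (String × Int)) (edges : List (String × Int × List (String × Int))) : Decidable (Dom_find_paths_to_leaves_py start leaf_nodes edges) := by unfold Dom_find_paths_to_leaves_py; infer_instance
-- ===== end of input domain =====

-- ===== PORT A =====
-- B replaces A's mutating backtracking DFS by a pure compositional recursion over a
-- shrinking complement set; equal return value on every input (neither mutates its arguments).

-- port of Python's `edges.get(v, set())` / `edges.get(v, ())`: dict lookup (unique keys; first match)
def pvNbrs (edges : List (String × Int × List (String × Int))) (v : String × Int) : List (String × Int) :=
  match edges.find? (fun e => (e.1, e.2.1) == v) with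
  | some e => e.2.2
  | none => []

-- A's inner `dfs`: `path.pop()` / `visited.remove(current)` exactly undo the `append`/`add`,
-- so the mutated path/visited are threaded functionally; only `paths` flows back.
-- `fuel` is a totality guard only (recursion depth is bounded by the number of distinct
-- vertices); the branch for 0 is never reached from `find_paths_to_leaves_py`'s call.
def pvDfsA (leaf_nodes : List (String × Int)) (edges : List (String × Int × List (String × Int))) :
    Nat → (String × Int) → List (String × Int) → PySem.Set (String × Int) →
    List (List (String × Int)) → List (List (String × Int))
  | 0, _, _, _, paths => paths
  | fuel+1, current, path, visited, paths =>
    let path' := path ++ [current]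
    let visited' := PySem.Set.add visited current
    if current ∈ leaf_nodes then
      paths ++ [path']
    else
      (pvNbrs edges current).foldl
        (fun acc n => if n ∉ visited' then pvDfsA leaf_nodes edges fuel n path' visited' acc else acc)
        paths

def find_paths_to_leaves_py (start : String × Int) (leaf_nodes : List (String × Int)) (edges : List (String × Int × List (String × Int))) : List (List (String × Int)) :=
  pvDfsA leaf_nodes edges
    ((start :: edges.flatMap (fun e => (e.1, e.2.1) :: e.2.2)).length + 1)
    start [] PySem.Set.empty []

-- ===== PORT B =====
-- B's `walk(current, remaining)`: structurally terminating, `remaining` shrinks at each call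
def pvWalkB (leaf_nodes : List (String × Int)) (edges : List (String × Int × List (String × Int)))
    (current : String × Int) (remaining : List (String × Int)) : List (List (String × Int)) :=
  if current ∈ leaf_nodes then [[current]]
  else
    (pvNbrs edges current).flatMap (fun n =>
      if _h : n ∈ remaining then
        (pvWalkB leaf_nodes edges n (remaining.erase n)).map (fun rest => current :: rest)
      else [])
termination_by remaining.length
decreasing_by
  have := List.length_erase_of_mem _h
  have := List.length_pos_of_mem _h
  omega

def find_paths_to_leaves_py_alt (start : String × Int) (leaf_nodes : List (String × Int)) (edges : List (String × Int × List (String × Int))) : List (List (String × Int)) :=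
  -- the `vertices` accumulation loop of Source B
  let vertices : PySem.Set (String × Int) :=
    edges.foldl (fun acc e => PySem.Set.update (PySem.Set.add acc (e.1, e.2.1)) e.2.2)
      (PySem.Set.ofList [start])
  pvWalkB leaf_nodes edges start (PySem.Set.diff vertices (PySem.Set.ofList [start]))

-- ===== PRECONDITION & SPEC =====
def Spec_find_paths_to_leaves_py (start : String × Int) (leaf_nodes : List (String × Int)) (edges : List (String × Int × List (String × Int))) (out : List (List (String × Int))) : Prop := out = find_paths_to_leaves_py_alt start leaf_nodes edges
instance (start : String × Int) (leaf_nodes : List (String × Int)) (edges : List (String × Int × List (String × Int))) (out : List (List (String × Int))) : Decidable (Spec_find_paths_to_leaves_py start leaf_nodes edges out) := by unfold Spec_find_paths_to_leaves_py; infer_instance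

-- ===== CLAIM (what is proved, stated in full; the proofs are below) =====
def Claim_equal_find_paths_to_leaves_py : Prop := ∀ (start : String × Int) (leaf_nodes : List (String × Int)) (edges : List (String × Int × List (String × Int))), Dom_find_paths_to_leaves_py start leaf_nodes edges → Spec_find_paths_to_leaves_py start leaf_nodes edges (find_paths_to_leaves_py start leaf_nodes edges)

-- ===== LEMMAS AND PROOFS =====

-- all vertices occurring as a neighbor in some edge entry
def pvAllNbrs (edges : List (String × Int × List (String × Int))) : List (String × Int) :=
  edges.flatMap (fun e => e.2.2)

theorem pvNbrs_subset (edges : List (String × Int × List (String × Int))) (v n : String × Int)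
    (h : n ∈ pvNbrs edges v) : n ∈ pvAllNbrs edges := by
  unfold pvNbrs at h
  cases hf : edges.find? (fun e => (e.1, e.2.1) == v) with
  | none => rw [hf] at h; simp at h
  | some e =>
    rw [hf] at h
    exact List.mem_flatMap.2 ⟨e, List.mem_of_find?_eq_some hf, h⟩

-- Core invariant: A's growing `visited ∪ {current}` is the complement (inside the vertex
-- universe) of B's shrinking `remaining`; under it the accumulator-threading dfs equals
-- `paths ++` the compositional walk's output, each suffix prefixed with `path`.
theorem pvDfs_eq_walk (L : List (String × Int)) (edges : List (String × Int × List (String × Int))) :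
    ∀ (fuel : Nat) (remaining : List (String × Int)) (current : String × Int)
      (path : List (String × Int)) (visited : PySem.Set (String × Int))
      (paths : List (List (String × Int))),
      remaining.Nodup →
      remaining.length + 1 ≤ fuel →
      (∀ v, v ∈ pvAllNbrs edges → (v ∈ remaining ↔ v ∉ PySem.Set.add visited current)) →
      pvDfsA L edges fuel current path visited paths
        = paths ++ (pvWalkB L edges current remaining).map (fun rest => path ++ rest) := by
  intro fuel
  induction fuel with
  | zero => intro _ _ _ _ _ _ h; omega
  | succ fuel ih =>
    intro remaining current path visited paths hnd hfuel hrel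
    rw [pvWalkB]
    by_cases hleaf : current ∈ L
    · simp [pvDfsA, hleaf]
    · simp only [pvDfsA, if_neg hleaf]
      have haux : ∀ (ns : List (String × Int)), (∀ n ∈ ns, n ∈ pvAllNbrs edges) →
          ∀ (acc : List (List (String × Int))),
          ns.foldl (fun acc n => if n ∉ PySem.Set.add visited current then
              pvDfsA L edges fuel n (path ++ [current]) (PySem.Set.add visited current) acc else acc) acc
            = acc ++ (ns.flatMap (fun n => if _ : n ∈ remaining then
                (pvWalkB L edges n (remaining.erase n)).map (fun rest => current :: rest)
              else [])).map (fun rest => path ++ rest) := by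
        intro ns
        induction ns with
        | nil => intro _ acc; simp
        | cons n ns ihn =>
          intro hmem acc
          have hn : n ∈ pvAllNbrs edges := hmem n (by simp)
          have hmem' : ∀ m ∈ ns, m ∈ pvAllNbrs edges := fun m hm => hmem m (List.mem_cons_of_mem n hm)
          by_cases hnr : n ∈ remaining
          · have hnv : n ∉ PySem.Set.add visited current := (hrel n hn).1 hnr
            have hrec := ih (remaining.erase n) n (path ++ [current]) (PySem.Set.add visited current) acc
              (hnd.erase n)
              (by have h1 := List.length_erase_of_mem hnr
                  have h2 := List.length_pos_of_mem hnr
                  omega)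
              (by intro v hv
                  have hrelv := hrel v hv
                  rw [hnd.mem_erase_iff, PySem.Set.mem_add]
                  tauto)
            simp only [List.foldl_cons, List.flatMap_cons, if_pos hnv, dif_pos hnr, hrec,
              ihn hmem']
            simp [List.map_map, Function.comp, List.append_assoc]
          · have hnv : ¬ n ∉ PySem.Set.add visited current := fun hnot => hnr ((hrel n hn).2 hnot)
            simp only [List.foldl_cons, List.flatMap_cons, if_neg hnv, dif_neg hnr,
              List.nil_append]
            exact ihn hmem' acc
      exact haux (pvNbrs edges current) (fun m hm => pvNbrs_subset edges current m hm) paths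

-- length bound for the vertex-set build of B (used to justify A's fuel)
theorem pvUpdate_len (xs : List (String × Int)) :
    ∀ s : PySem.Set (String × Int), (PySem.Set.update s xs).length ≤ s.length + xs.length := by
  induction xs with
  | nil => intro s; simp [PySem.Set.update]
  | cons x xs ih =>
    intro s
    have h1 : (PySem.Set.add s x).length ≤ s.length + 1 := by
      unfold PySem.Set.add; split <;> simp
    have h2 := ih (PySem.Set.add s x)
    simp only [PySem.Set.update, List.foldl_cons] at *
    simp only [List.length_cons]
    omega

theorem pvBuild_len (edges : List (String × Int × List (String × Int))) :
    ∀ s : PySem.Set (String × Int),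
      (edges.foldl (fun acc e => PySem.Set.update (PySem.Set.add acc (e.1, e.2.1)) e.2.2) s).length
        ≤ s.length + (edges.flatMap (fun e => (e.1, e.2.1) :: e.2.2)).length := by
  induction edges with
  | nil => intro s; simp
  | cons e es ih =>
    intro s
    have h1 : (PySem.Set.add s (e.1, e.2.1)).length ≤ s.length + 1 := by
      unfold PySem.Set.add; split <;> simp
    have h2 := pvUpdate_len e.2.2 (PySem.Set.add s (e.1, e.2.1))
    have h3 := ih (PySem.Set.update (PySem.Set.add s (e.1, e.2.1)) e.2.2)
    simp only [List.foldl_cons, List.flatMap_cons, List.length_append, List.length_cons] at *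
    omega

theorem pvBuild_nodup (edges : List (String × Int × List (String × Int))) :
    ∀ s : PySem.Set (String × Int), s.Nodup →
      (edges.foldl (fun acc e => PySem.Set.update (PySem.Set.add acc (e.1, e.2.1)) e.2.2) s).Nodup := by
  induction edges with
  | nil => intro s hs; simpa using hs
  | cons e es ih =>
    intro s hs
    exact ih _ (PySem.Set.nodup_update _ _ (PySem.Set.nodup_add _ _ hs))

theorem pvBuild_mem_mono (edges : List (String × Int × List (String × Int))) :
    ∀ (s : PySem.Set (String × Int)) (v : String × Int), v ∈ s →
      v ∈ edges.foldl (fun acc e => PySem.Set.update (PySem.Set.add acc (e.1, e.2.1)) e.2.2) s := by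
  induction edges with
  | nil => intro s v hv; simpa using hv
  | cons e es ih =>
    intro s v hv
    exact ih _ v ((PySem.Set.mem_update _ _ _).2 (Or.inl ((PySem.Set.mem_add _ _ _).2 (Or.inl hv))))

theorem pvBuild_mem_nbrs (edges : List (String × Int × List (String × Int))) :
    ∀ (s : PySem.Set (String × Int)) (v : String × Int), v ∈ pvAllNbrs edges →
      v ∈ edges.foldl (fun acc e => PySem.Set.update (PySem.Set.add acc (e.1, e.2.1)) e.2.2) s := by
  induction edges with
  | nil => intro s v hv; simp [pvAllNbrs] at hv
  | cons e es ih =>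
    intro s v hv
    rcases List.mem_flatMap.1 hv with ⟨f, hf, hvf⟩
    rcases List.mem_cons.1 hf with rfl | hf
    · exact pvBuild_mem_mono es _ v ((PySem.Set.mem_update _ _ _).2 (Or.inr hvf))
    · exact ih _ v (List.mem_flatMap.2 ⟨f, hf, hvf⟩)

-- ===== VERDICT (by name: the statement is the Claim_ definition above) =====
theorem find_paths_to_leaves_py_spec : Claim_equal_find_paths_to_leaves_py := by
  intro start L edges _
  unfold Spec_find_paths_to_leaves_py find_paths_to_leaves_py find_paths_to_leaves_py_alt
  have hof : PySem.Set.ofList [start] = [start] := rfl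
  set V : PySem.Set (String × Int) :=
    edges.foldl (fun acc e => PySem.Set.update (PySem.Set.add acc (e.1, e.2.1)) e.2.2)
      (PySem.Set.ofList [start]) with hV
  have hdiff_len : (PySem.Set.diff V (PySem.Set.ofList [start])).length ≤ V.length := by
    unfold PySem.Set.diff; exact List.length_filter_le _ _
  have hVlen : V.length ≤ 1 + (edges.flatMap (fun e => (e.1, e.2.1) :: e.2.2)).length := by
    have := pvBuild_len edges (PySem.Set.ofList [start])
    rw [hof] at this; simpa using this
  rw [pvDfs_eq_walk L edges _ (PySem.Set.diff V (PySem.Set.ofList [start])) start [] PySem.Set.empty []]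
  · simp
  · exact PySem.Set.nodup_diff _ _ (pvBuild_nodup edges _ (by rw [hof]; simp))
  · simp only [List.length_cons]
    omega
  · intro v hv
    rw [PySem.Set.mem_add, PySem.Set.mem_diff, PySem.Set.mem_ofList]
    have hvV := pvBuild_mem_nbrs edges (PySem.Set.ofList [start]) v hv
    simp only [List.mem_singleton, PySem.Set.empty, List.not_mem_nil, false_or]
    constructor
    · rintro ⟨_, hne⟩ he; exact hne he
    · intro hne; exact ⟨hvV, hne⟩
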